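-- pv_equiv track=rewrite | github.com/Preyash1808/design-agent-simulator-ui | archive/backend-2025-10-20/scripts/simulate_user_traversal.py | find_screen_name_match
-- ===== SOURCE A (Python) =====
-- from typing import Dict, Any, List, Tuple, Optional
--
-- def normalize(s: str) -> str:
--     return ''.join(ch.lower() for ch in (s or '') if ch.isalnum())
--
-- def find_screen_name_match(candidates: List[str], query: str) -> Optional[str]:
--     qn = normalize(query)
--     best = None
--     best_len = 0
--     for c in candidates:
--         cn = normalize(c)
--         if qn == cn:
--             return c
--         if qn and qn in cn and len(cn) > best_len:
--             best = c
--             best_len = len(cn)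
--     return best
-- ===== SOURCE B (Python) =====
-- from typing import List, Optional
--
-- def normalize(s: str) -> str:
--     return ''.join(ch.lower() for ch in (s or '') if ch.isalnum())
--
-- def find_screen_name_match(candidates: List[str], query: str) -> Optional[str]:
--     qn = normalize(query)
--     exact = next((c for c in candidates if normalize(c) == qn), None)
--     if exact is not None:
--         return exact
--     if not qn:
--         return None
--     subs = [c for c in candidates if qn in normalize(c)]
--     return max(subs, key=lambda c: len(normalize(c)), default=None)
-- ===== Notes on version B (the rewrite author's own statement) =====
-- stated objective: alternative
-- what changed: Replaces A's single loop with interleaved early-return and best-so-far state by two independent passes: a first-exact-match search (next), then a substring filter whose longest-normalization element is taken with max(..., default=None).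
import Mathlib
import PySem

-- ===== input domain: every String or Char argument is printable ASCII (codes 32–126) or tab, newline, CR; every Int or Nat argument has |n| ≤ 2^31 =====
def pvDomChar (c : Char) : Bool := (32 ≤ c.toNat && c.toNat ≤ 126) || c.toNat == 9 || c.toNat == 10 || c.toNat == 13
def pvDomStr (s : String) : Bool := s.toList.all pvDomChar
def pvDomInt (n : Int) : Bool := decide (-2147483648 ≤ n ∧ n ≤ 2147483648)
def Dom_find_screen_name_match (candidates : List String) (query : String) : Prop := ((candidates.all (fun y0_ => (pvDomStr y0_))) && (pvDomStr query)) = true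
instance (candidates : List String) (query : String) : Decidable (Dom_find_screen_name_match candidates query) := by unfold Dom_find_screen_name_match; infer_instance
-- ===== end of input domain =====

-- B replaces A's single loop (early return + best-so-far state) by two independent passes:
-- find the first exact normalized match, else take the longest-normalization substring match.
-- Proved equal on all inputs (both programs are total).

-- ===== PORT A =====
-- normalize(s): ''.join(ch.lower() for ch in s if ch.isalnum()), kept as List Char
def normChars (s : String) : List Char :=
  (s.toList.filter PySem.Chars.isalnum).map PySem.Chars.lowerChar

-- the for-loop of A, with its two accumulators (best, best_len) and the early return
def findLoopA (qn : List Char) : List String → Option String → Nat → Option String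
  | [], best, _ => best
  | c :: rest, best, bestLen =>
    let cn := normChars c
    if qn = cn then some c
    else if qn ≠ [] ∧ PySem.Chars.isIn qn cn = true ∧ cn.length > bestLen then
      findLoopA qn rest (some c) cn.length
    else findLoopA qn rest best bestLen

def find_screen_name_match (candidates : List String) (query : String) : Option String :=
  findLoopA (normChars query) candidates none 0

-- ===== PORT B =====
def find_screen_name_match_alt (candidates : List String) (query : String) : Option String :=
  let qn := normChars query
  match candidates.find? (fun c => normChars c == qn) with
  | some c => some c
  | none =>
    if qn = [] then none
    else
      let subs := candidates.filter (fun c => PySem.Chars.isIn qn (normChars c))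
      PySem.List.max? subs (fun c => (normChars c).length)

-- ===== PRECONDITION & SPEC =====
def Spec_find_screen_name_match (candidates : List String) (query : String) (out : Option String) : Prop := out = find_screen_name_match_alt candidates query
instance (candidates : List String) (query : String) (out : Option String) : Decidable (Spec_find_screen_name_match candidates query out) := by unfold Spec_find_screen_name_match; infer_instance

-- ===== CLAIM (what is proved, stated in full; the proofs are below) =====
def Claim_equal_find_screen_name_match : Prop := ∀ (candidates : List String) (query : String), Dom_find_screen_name_match candidates query → Spec_find_screen_name_match candidates query (find_screen_name_match candidates query)

-- ===== LEMMAS AND PROOFS =====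

-- the body of A's loop once the exact-match return is factored out
def stepA (qn : List Char) (st : Option String × Nat) (c : String) : Option String × Nat :=
  if qn ≠ [] ∧ PySem.Chars.isIn qn (normChars c) = true ∧ (normChars c).length > st.2 then
    (some c, (normChars c).length)
  else st

-- the step of PySem.List.max? once the accumulator is some
def stepM (o : Option String) (c : String) : Option String :=
  match o with
  | none => some c
  | some m => if (normChars m).length < (normChars c).length then some c else some m

lemma max?_eq_foldl_stepM (l : List String) :
    PySem.List.max? l (fun c => (normChars c).length) = l.foldl stepM none := by
  unfold PySem.List.max?
  apply PySem.List.foldl_congr_mem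
  intro acc x _
  cases acc <;> rfl

-- A's loop = first exact match, else the fold of stepA over all candidates
lemma findLoopA_split (qn : List Char) :
    ∀ (cs : List String) (best : Option String) (bestLen : Nat),
    findLoopA qn cs best bestLen =
      match cs.find? (fun c => normChars c == qn) with
      | some c => some c
      | none => (cs.foldl (stepA qn) (best, bestLen)).1 := by
  intro cs
  induction cs with
  | nil => intro best bestLen; simp [findLoopA]
  | cons c rest ih =>
    intro best bestLen
    by_cases hx : qn = normChars c
    · simp [findLoopA, hx, List.find?]
    · have hx' : (normChars c == qn) = false := by
        simp; exact fun h => hx h.symm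
      by_cases hc : qn ≠ [] ∧ PySem.Chars.isIn qn (normChars c) = true ∧ (normChars c).length > bestLen
      · simp [findLoopA, hx, hc, List.find?, hx', ih, stepA]
      · simp [findLoopA, hx, hc, List.find?, hx', ih, stepA]

-- stepA from a (some b, len b) state is stepM restricted to the substring candidates
lemma foldA_some (qn : List Char) (hqn : qn ≠ []) :
    ∀ (cs : List String) (b : String),
    (cs.foldl (stepA qn) (some b, (normChars b).length)).1 =
      (cs.filter (fun c => PySem.Chars.isIn qn (normChars c))).foldl (stepM) (some b) := by
  intro cs
  induction cs with
  | nil => intro b; simp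
  | cons c rest ih =>
    intro b
    by_cases hin : PySem.Chars.isIn qn (normChars c) = true
    · by_cases hgt : (normChars b).length < (normChars c).length
      · simp [stepA, stepM, hin, hqn, hgt, List.filter, ih]
      · have : ¬ (qn ≠ [] ∧ PySem.Chars.isIn qn (normChars c) = true ∧
            (normChars c).length > (normChars b).length) := by
          intro ⟨_, _, h⟩; exact hgt h
        simp [stepA, stepM, hin, hgt, List.filter, ih]
    · have : ¬ (qn ≠ [] ∧ PySem.Chars.isIn qn (normChars c) = true ∧
          (normChars c).length > (normChars b).length) := by
        intro ⟨_, h, _⟩; exact hin h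
      simp [stepA, hin, List.filter, ih]

-- a substring candidate has a nonempty normalization when qn is nonempty
lemma norm_len_pos (qn : List Char) (hqn : qn ≠ []) (c : String)
    (hin : PySem.Chars.isIn qn (normChars c) = true) : 0 < (normChars c).length := by
  have hinf : qn <:+: normChars c := (PySem.Chars.isIn_iff_infix qn (normChars c)).1 hin
  have := hinf.length_le
  cases qn with
  | nil => exact absurd rfl hqn
  | cons a t => simp at this; omega

-- the full fold from (none, 0) computes max? of the substring candidates
lemma foldA_none (qn : List Char) (hqn : qn ≠ []) (cs : List String) :
    (cs.foldl (stepA qn) (none, 0)).1 =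
      PySem.List.max? (cs.filter (fun c => PySem.Chars.isIn qn (normChars c)))
        (fun c => (normChars c).length) := by
  rw [max?_eq_foldl_stepM]
  induction cs with
  | nil => simp
  | cons c rest ih =>
    by_cases hin : PySem.Chars.isIn qn (normChars c) = true
    · have hpos := norm_len_pos qn hqn c hin
      have hcond : qn ≠ [] ∧ PySem.Chars.isIn qn (normChars c) = true ∧
          (normChars c).length > 0 := ⟨hqn, hin, hpos⟩
      simp only [List.foldl_cons, List.filter_cons, hin, if_pos]
      have h1 : stepA qn (none, 0) c = (some c, (normChars c).length) := by
        simp [stepA, hcond]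
      have h2 : stepM none c = some c := rfl
      rw [h1, h2]
      exact foldA_some qn hqn rest c
    · have : ¬ (qn ≠ [] ∧ PySem.Chars.isIn qn (normChars c) = true ∧
          (normChars c).length > 0) := by intro ⟨_, h, _⟩; exact hin h
      simp only [List.foldl_cons, List.filter_cons, hin]
      have h1 : stepA qn (none, 0) c = (none, 0) := by simp [stepA, this]
      rw [h1]
      simpa using ih

-- when qn = [], stepA never fires
lemma foldA_empty (cs : List String) :
    (cs.foldl (stepA []) ((none : Option String), 0)).1 = none := by
  have h : cs.foldl (stepA []) (none, 0) = (none, 0) := by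
    have := PySem.List.foldl_congr_mem (f := stepA []) (g := fun acc _ => acc)
      (l := cs) (init := ((none : Option String), 0))
      (by intro acc x _; simp [stepA])
    rw [this, PySem.List.foldl_ignore]
  rw [h]

-- ===== VERDICT (by name: the statement is the Claim_ definition above) =====
theorem find_screen_name_match_spec : Claim_equal_find_screen_name_match := by
  intro candidates query _
  unfold Spec_find_screen_name_match find_screen_name_match find_screen_name_match_alt
  rw [findLoopA_split]
  cases hf : candidates.find? (fun c => normChars c == normChars query) with
  | some c => simp only [hf]
  | none =>
    simp only [hf]
    by_cases hqn : normChars query = []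
    · rw [hqn, if_pos rfl]
      exact foldA_empty candidates
    · rw [if_neg hqn]
      exact foldA_none (normChars query) hqn candidates
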